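-- pv_equiv track=rewrite | github.com/leila-digh/Coding-Practice | CamelCase - Hacker Rank/Solution.py | firstCharC
-- ===== SOURCE A (Python) =====
-- def firstCharC(userInput):
--     typeChar = userInput[2]
--
--     space = False
--     output = "";
--     userInput = userInput[4:]
--
--     for x in userInput:
--         if(x == " "):
--             space = True
--         elif space:
--             output += x.upper()
--             space = False
--         else:
--             output += x
--
--     if typeChar == 'M':
--         output += "()"
--
--     if typeChar == 'C':
--         output = output[0].upper() + output[1:]
--
--     return output
-- ===== SOURCE B (Python) =====
-- def firstCharC(userInput):
--     typeChar = userInput[2]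
--     # staged: split the body on literal spaces, then join the chunks,
--     # capitalizing the first char of every chunk that followed a space
--     parts = userInput[4:].split(' ')
--     output = parts[0] + "".join(p[:1].upper() + p[1:] for p in parts[1:])
--     if typeChar == 'M':
--         output += "()"
--     if typeChar == 'C':
--         output = output[0].upper() + output[1:]
--     return output
-- ===== Notes on version B (the rewrite author's own statement) =====
-- stated objective: faster
-- what changed: Replaced A's single-pass space-flag loop with per-character string concatenation by a staged split-on-space / capitalize-each-chunk / join pipeline using C-level str.split and str.join.
-- outside the precondition, e.g. on firstCharC('C'): A raises IndexError, B raises IndexError; on firstCharC('ab'): A raises IndexError, B raises IndexError; on firstCharC('S;C;   '): A raises IndexError, B raises IndexError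
import Mathlib
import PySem

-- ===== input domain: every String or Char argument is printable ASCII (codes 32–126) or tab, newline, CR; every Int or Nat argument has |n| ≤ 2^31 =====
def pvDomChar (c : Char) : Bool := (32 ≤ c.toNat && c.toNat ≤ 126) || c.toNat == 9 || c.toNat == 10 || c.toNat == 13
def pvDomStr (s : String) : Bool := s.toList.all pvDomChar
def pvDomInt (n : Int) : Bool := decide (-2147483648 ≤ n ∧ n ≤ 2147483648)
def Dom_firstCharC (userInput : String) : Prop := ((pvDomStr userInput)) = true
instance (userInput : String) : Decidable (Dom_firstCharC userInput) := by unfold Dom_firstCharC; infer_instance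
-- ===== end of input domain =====

-- B replaces A's space-flag loop (per-char string concatenation) by a staged
-- split-on-space / capitalize-chunks / join pipeline; measured faster (constant factor).


-- ===== PORT A =====
def firstCharC (userInput : String) : String :=
  let typeChar := PySem.Str.pyGet? userInput 2
  let body := PySem.Chars.slice userInput.toList (some 4) none
  let st := body.foldl (fun (st : Bool × List Char) x =>
    if x = ' ' then (true, st.2)
    else if st.1 then (false, st.2 ++ [PySem.Chars.upperChar x])
    else (st.1, st.2 ++ [x])) (false, [])
  let output := st.2
  let output := if typeChar = some 'M' then output ++ ['(', ')'] else output
  let output := if typeChar = some 'C' then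
      match output with
      | [] => []   -- Python raises IndexError here; excluded by Pre_firstCharC
      | c :: rest => PySem.Chars.upperChar c :: rest
    else output
  String.ofList output

-- ===== PORT B =====
-- Python's body.split(' '): chunks between literal spaces, empties kept.
def pvSplitSp : List Char → List (List Char)
  | [] => [[]]
  | c :: cs =>
    match pvSplitSp cs with
    | [] => []   -- unreachable: pvSplitSp never returns []
    | w :: ws => if c = ' ' then [] :: w :: ws else (c :: w) :: ws

-- p[:1].upper() + p[1:]
def pvCap : List Char → List Char
  | [] => []
  | c :: cs => PySem.Chars.upperChar c :: cs

def firstCharC_alt (userInput : String) : String :=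
  let typeChar := PySem.Str.pyGet? userInput 2
  let parts := pvSplitSp (PySem.Chars.slice userInput.toList (some 4) none)
  let output := match parts with
    | [] => []   -- unreachable
    | w :: ws => w ++ ws.flatMap pvCap
  let output := if typeChar = some 'M' then output ++ ['(', ')'] else output
  let output := if typeChar = some 'C' then
      match output with
      | [] => []   -- Python raises IndexError here; excluded by Pre_firstCharC
      | c :: rest => PySem.Chars.upperChar c :: rest
    else output
  String.ofList output

-- ===== PRECONDITION & SPEC =====
-- Pre_ excludes exactly the inputs where Python A raises IndexError: strings shorter
-- than 3 (userInput[2]), and type 'C' inputs whose body is all spaces (output[0] on "").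
def Pre_firstCharC (userInput : String) : Prop :=
  3 ≤ userInput.toList.length ∧
    (userInput.toList[2]? = some 'C' → ((userInput.toList.drop 4).any (· ≠ ' ')) = true)
instance (userInput : String) : Decidable (Pre_firstCharC userInput) := by
  unfold Pre_firstCharC; infer_instance
def pvWitness_firstCharC : String := "S;C;hello world"

def Spec_firstCharC (userInput : String) (out : String) : Prop := out = firstCharC_alt userInput
instance (userInput : String) (out : String) : Decidable (Spec_firstCharC userInput out) := by unfold Spec_firstCharC; infer_instance

-- ===== CLAIM (what is proved, stated in full; the proofs are below) =====
def Claim_equal_firstCharC : Prop := ∀ (userInput : String), Dom_firstCharC userInput → Pre_firstCharC userInput → Spec_firstCharC userInput (firstCharC userInput)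

-- ===== LEMMAS AND PROOFS =====

/-- Recursive description of A's camel-casing pass: `sp` says whether the
previous character was a space. -/
def camelGo (sp : Bool) : List Char → List Char
  | [] => []
  | c :: cs =>
    if c = ' ' then camelGo true cs
    else (if sp then PySem.Chars.upperChar c else c) :: camelGo false cs

theorem foldA_eq_camelGo (cs : List Char) : ∀ (sp : Bool) (acc : List Char),
    (cs.foldl (fun (st : Bool × List Char) x =>
      if x = ' ' then (true, st.2)
      else if st.1 then (false, st.2 ++ [PySem.Chars.upperChar x])
      else (st.1, st.2 ++ [x])) (sp, acc)).2 = acc ++ camelGo sp cs := by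
  induction cs with
  | nil => intro sp acc; simp [camelGo]
  | cons c cs ih =>
    intro sp acc
    by_cases hc : c = ' '
    · simp [List.foldl, hc, camelGo, ih]
    · cases sp <;> simp [List.foldl, hc, camelGo, ih]

theorem pvSplitSp_ne_nil (cs : List Char) : pvSplitSp cs ≠ [] := by
  induction cs with
  | nil => simp [pvSplitSp]
  | cons c cs ih =>
    cases hs : pvSplitSp cs with
    | nil => exact absurd hs ih
    | cons w ws => simp only [pvSplitSp, hs]; split <;> simp

theorem split_eq_camelGo (cs : List Char) :
    (match pvSplitSp cs with
      | [] => []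
      | w :: ws => w ++ ws.flatMap pvCap) = camelGo false cs ∧
    (pvSplitSp cs).flatMap pvCap = camelGo true cs := by
  induction cs with
  | nil => simp [pvSplitSp, camelGo, pvCap]
  | cons c cs ih =>
    obtain ⟨ih1, ih2⟩ := ih
    cases hs : pvSplitSp cs with
    | nil => exact absurd hs (pvSplitSp_ne_nil cs)
    | cons w ws =>
      rw [hs] at ih1 ih2
      by_cases hc : c = ' '
      · simp [pvSplitSp, hs, hc, camelGo, pvCap, ← ih2]
      · constructor <;> simp [pvSplitSp, hs, hc, camelGo, pvCap, ← ih1]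

-- ===== VERDICT (by name: the statement is the Claim_ definition above) =====
theorem firstCharC_spec : Claim_equal_firstCharC := by
  intro userInput _ _
  show firstCharC userInput = firstCharC_alt userInput
  simp only [firstCharC, firstCharC_alt, foldA_eq_camelGo, (split_eq_camelGo _).1,
    List.nil_append]
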